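-- pv_equiv track=rewrite | github.com/logan-anderson/competitive-programming | divide.py | getRidOfTrailing
-- ===== SOURCE A (Python) =====
-- def getRidOfTrailing(num):
--     found = False
--     i = len(num) -1
--     while True:
--         if num[i] == '.':
--             return i
--         if num[i] != '0':
--             return i + 1
--         i = i -1
--     return i
-- ===== SOURCE B (Python) =====
-- def getRidOfTrailing(num):
--     # single FORWARD pass: remember the last (index, char) that is not '0';
--     # that position is where the cut goes ('.' -> its index, else index + 1)
--     last = None
--     for j, c in enumerate(num):
--         if c != '0':
--             last = (j, c)
--     j, c = last
--     return j if c == '.' else j + 1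
-- ===== Notes on version B (the rewrite author's own statement) =====
-- stated objective: alternative
-- what changed: Replaces A's backward while-loop from the end of the string with a single forward enumerate pass that keeps the last non-'0' (index, char) pair and reads the answer off that pair.
import Mathlib
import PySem

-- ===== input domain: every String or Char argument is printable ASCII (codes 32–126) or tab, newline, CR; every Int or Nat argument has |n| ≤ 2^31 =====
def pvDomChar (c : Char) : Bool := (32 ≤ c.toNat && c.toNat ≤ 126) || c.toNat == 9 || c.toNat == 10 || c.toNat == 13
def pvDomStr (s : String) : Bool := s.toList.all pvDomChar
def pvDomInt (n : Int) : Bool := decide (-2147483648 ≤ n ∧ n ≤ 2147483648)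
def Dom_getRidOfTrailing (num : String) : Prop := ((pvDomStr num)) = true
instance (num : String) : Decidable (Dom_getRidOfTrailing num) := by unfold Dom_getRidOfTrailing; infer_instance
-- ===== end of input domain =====

-- B makes a single FORWARD pass with enumerate remembering the last non-'0' (index, char)
-- pair, instead of A's backward while-loop from the end of the string (objective: alternative).

-- ===== PORT A =====
-- the index stays in range exactly while pyGet? returns some; used for termination
theorem pvLoopA_term (s : List Char) (i : Int) (c : Char)
    (h : PySem.List.pyGet? s i = some c) :
    ((i - 1) + s.length + 1).toNat < (i + s.length + 1).toNat := by
  have hn : ¬ PySem.List.pyGet? s i = none := by simp [h]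
  rw [PySem.List.pyGet?_eq_none_iff] at hn
  simp only [PySem.Raise.InRange, not_not] at hn
  omega

-- the 'while True' loop of A; none models the IndexError Python raises when i walks below -len
def pvLoopA (s : List Char) (i : Int) : Option Int :=
  match h : PySem.List.pyGet? s i with
  | none => none
  | some c =>
    if c = '.' then some i
    else if c ≠ '0' then some (i + 1)
    else pvLoopA s (i - 1)
termination_by (i + s.length + 1).toNat
decreasing_by exact pvLoopA_term s i _ h

def getRidOfTrailing (num : String) : Int :=
  (pvLoopA num.toList ((num.toList.length : Int) - 1)).getD 0  -- getD 0 unreachable under Pre_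

-- ===== PORT B =====
-- B's forward accumulator: last (index, char) with char ≠ '0' seen so far
def pvLastB (s : List Char) : Option (Int × Char) :=
  (PySem.List.enumerate s).foldl
    (fun acc jc => if jc.2 ≠ '0' then some jc else acc) none

def getRidOfTrailing_alt (num : String) : Int :=
  match pvLastB num.toList with  -- 'last = None; for j, c in enumerate(num): if c != '0': last = (j, c)'
  | none => 0                    -- Python raises here (unpacking None); excluded by Pre_
  | some (j, c) => if c = '.' then j else j + 1

-- ===== PRECONDITION & SPEC =====
-- Pre_ excludes exactly the inputs where both programs raise (every character '0', incl. empty)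
def Pre_getRidOfTrailing (num : String) : Prop := (num.toList.any fun c => c != '0') = true
instance (num : String) : Decidable (Pre_getRidOfTrailing num) := by
  unfold Pre_getRidOfTrailing; infer_instance
def pvWitness_getRidOfTrailing : String := "5"

def Spec_getRidOfTrailing (num : String) (out : Int) : Prop := out = getRidOfTrailing_alt num
instance (num : String) (out : Int) : Decidable (Spec_getRidOfTrailing num out) := by
  unfold Spec_getRidOfTrailing; infer_instance

-- ===== CLAIM (what is proved, stated in full; the proofs are below) =====
def Claim_equal_getRidOfTrailing : Prop := ∀ (num : String), Dom_getRidOfTrailing num → Pre_getRidOfTrailing num → Spec_getRidOfTrailing num (getRidOfTrailing num)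

-- ===== LEMMAS AND PROOFS =====

-- B's body on a list of characters
def pvAltOf (s : List Char) : Int :=
  match pvLastB s with
  | none => 0
  | some (j, c) => if c = '.' then j else j + 1

theorem alt_eq_pvAltOf (num : String) : getRidOfTrailing_alt num = pvAltOf num.toList := rfl

-- one forward step of the accumulator, seen from the right end of the string
theorem pvLastB_append (s : List Char) (c : Char) :
    pvLastB (s ++ [c]) =
      if c ≠ '0' then some ((s.length : Int), c) else pvLastB s := by
  unfold pvLastB
  rw [PySem.List.enumerate_append, List.foldl_append]
  simp [PySem.List.enumerate_cons]

theorem pvAltOf_last (s : List Char) (c : Char) (hc : c ≠ '0') :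
    pvAltOf (s ++ [c]) =
      if c = '.' then (s.length : Int) else (s.length : Int) + 1 := by
  simp [pvAltOf, pvLastB_append, hc]

theorem pvAltOf_zero (s : List Char) :
    pvAltOf (s ++ ['0']) = pvAltOf s := by
  simp [pvAltOf, pvLastB_append]

theorem pvLoopA_some (s : List Char) (i : Int) (c : Char)
    (h : PySem.List.pyGet? s i = some c) :
    pvLoopA s i = if c = '.' then some i else if c ≠ '0' then some (i + 1)
      else pvLoopA s (i - 1) := by
  rw [pvLoopA]
  split
  · next heq => rw [heq] at h; exact absurd h (by simp)
  · next c' heq => rw [heq] at h; injection h with h; rw [h]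

-- main loop invariant: when some character at index ≤ i is not '0', A's loop computes
-- B's value on the prefix of length i+1
theorem pvLoop_eq (s : List Char) (i : Nat) (hi : i < s.length)
    (hex : ∃ j, j ≤ i ∧ s.getD j '0' ≠ '0') :
    pvLoopA s (i : Int) = some (pvAltOf (s.take (i + 1))) := by
  induction i with
  | zero =>
    obtain ⟨j, hj, hne⟩ := hex
    interval_cases j
    rw [List.getD_eq_getElem s '0' hi] at hne
    have hget : PySem.List.pyGet? s ((0 : Nat) : Int) = some s[0] :=
      PySem.List.pyGet?_ofNat s _ hi
    have htake : s.take (0 + 1) = [] ++ [s[0]] := by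
      simp [List.take_add_one, List.getElem?_eq_getElem hi]
    push_cast at hget ⊢
    rw [pvLoopA_some s 0 s[0] hget, htake, pvAltOf_last _ _ hne]
    by_cases hdot : s[0] = '.' <;> simp [hdot, hne]
  | succ n ih =>
    have hn : n < s.length := by omega
    have hget : PySem.List.pyGet? s ((n + 1 : Nat) : Int) = some s[n + 1] :=
      PySem.List.pyGet?_ofNat s _ hi
    have htake : s.take (n + 1 + 1) = s.take (n + 1) ++ [s[n + 1]] := by
      rw [List.take_add_one]
      simp [List.getElem?_eq_getElem hi]
    push_cast at hget ⊢
    rw [pvLoopA_some s _ s[n + 1] hget]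
    by_cases hdot : s[n + 1] = '.'
    · rw [if_pos hdot, htake, hdot, pvAltOf_last _ _ (by decide)]
      simp [List.length_take, hn]
    · rw [if_neg hdot]
      by_cases hz : s[n + 1] = '0'
      · simp only [hz, ne_eq, not_true_eq_false, if_false]
        obtain ⟨j, hj, hne⟩ := hex
        have hjn : j ≤ n := by
          rcases Nat.lt_or_ge j (n + 1) with h | h
          · omega
          · exfalso
            have : j = n + 1 := by omega
            rw [this, List.getD_eq_getElem s '0' hi, hz] at hne
            exact hne rfl
        have harith : ((n : Int) + 1) - 1 = (n : Int) := by ring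
        rw [harith, ih hn ⟨j, hjn, hne⟩, htake, hz, pvAltOf_zero]
      · rw [if_pos (by simpa using hz), htake, pvAltOf_last _ _ hz, if_neg hdot]
        simp [List.length_take, hn]

-- ===== VERDICT (by name: the statement is the Claim_ definition above) =====
theorem getRidOfTrailing_spec : Claim_equal_getRidOfTrailing := by
  intro num _ hpre
  unfold Spec_getRidOfTrailing
  obtain ⟨c, hc, hne'⟩ := List.any_eq_true.mp hpre
  have hne : c ≠ '0' := by simpa using hne'
  obtain ⟨j, hj, hjc⟩ := List.mem_iff_getElem.mp hc
  have hlen : 1 ≤ num.toList.length := by omega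
  have hi : num.toList.length - 1 < num.toList.length := by omega
  have hcast : ((num.toList.length : Int) - 1) = ((num.toList.length - 1 : Nat) : Int) := by
    omega
  have hloop := pvLoop_eq num.toList (num.toList.length - 1) hi
    ⟨j, by omega, by rw [List.getD_eq_getElem _ '0' hj, hjc]; exact hne⟩
  have htake : num.toList.take (num.toList.length - 1 + 1) = num.toList := by
    rw [Nat.sub_add_cancel hlen]; exact List.take_length
  rw [getRidOfTrailing, hcast, hloop, htake, Option.getD_some, alt_eq_pvAltOf]
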